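-- pv_equiv track=rewrite | github.com/Bobcatsoap/jy-server | cell/Room6_Test.py | is_three_liandui
-- ===== SOURCE A (Python) =====
-- import copy
--
-- def is_three_liandui(cards):
--     if len(cards) < 9:
--         return False
--     if len(cards) % 3 != 0:
--         return False
--     for card in cards:
--         if cards.count(card) != 3:
--             return False
--     new_cards = copy.deepcopy(cards)
--     new_cards.sort()
--     # 去重
--     for card in new_cards:
--         while new_cards.count(card) != 1:
--             new_cards.remove(card)
--     # 不能包含大小王
--     if new_cards[len(new_cards) - 1] > 15:
--         return False
--     for index in range(0, len(new_cards) - 1):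
--         if not new_cards[index] + 1 == new_cards[index + 1]:
--             return False
--     return True
-- ===== SOURCE B (Python) =====
-- def is_three_liandui(cards):
--     n = len(cards)
--     if n < 9 or n % 3 != 0:
--         return False
--     counts = {}
--     for c in cards:
--         counts[c] = counts.get(c, 0) + 1
--     if any(v != 3 for v in counts.values()):
--         return False
--     keys = sorted(counts)
--     if keys[-1] > 15:
--         return False
--     return all(b == a + 1 for a, b in zip(keys, keys[1:]))
-- ===== Notes on version B (the rewrite author's own statement) =====
-- stated objective: faster
-- what changed: Replaced A's repeated cards.count scans and the remove-until-unique dedup loop by a single counting dict, then one check over its values and one consecutive-run scan over the sorted distinct keys.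
import Mathlib
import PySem

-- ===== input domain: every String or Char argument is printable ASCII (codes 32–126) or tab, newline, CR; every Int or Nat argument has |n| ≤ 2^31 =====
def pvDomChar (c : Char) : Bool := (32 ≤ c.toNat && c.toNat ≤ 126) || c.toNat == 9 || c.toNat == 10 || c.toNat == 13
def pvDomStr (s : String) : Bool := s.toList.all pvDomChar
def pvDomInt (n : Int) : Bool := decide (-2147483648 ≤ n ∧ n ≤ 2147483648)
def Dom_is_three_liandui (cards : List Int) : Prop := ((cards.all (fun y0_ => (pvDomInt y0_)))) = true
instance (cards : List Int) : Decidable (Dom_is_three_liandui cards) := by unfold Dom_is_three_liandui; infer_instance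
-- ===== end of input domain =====

-- B replaces A's quadratic repeated cards.count / remove-dedup loops by one counting
-- dict plus a sorted-distinct-keys scan (objective: faster, asymptotic O(n^2) → O(n log n)).

-- ===== PORT A =====
-- 'while new_cards.count(card) != 1: new_cards.remove(card)' (fuel ≥ list length suffices;
-- the 'none' arm is Python's ValueError, unreachable because card is taken from the list)
def pvWhileRemove : Nat → List Int → Int → List Int
  | 0, l, _ => l
  | fuel + 1, l, card =>
    if l.count card ≠ 1 then
      match PySem.List.remove? l card with
      | some l' => pvWhileRemove fuel l' card
      | none => l
    else l

-- 'for card in new_cards: …' over the list being mutated: Python iterates by index,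
-- stopping when the index reaches the current length (fuel ≥ initial length suffices)
def pvDedupLoop : Nat → List Int → Nat → List Int
  | 0, l, _ => l
  | fuel + 1, l, i =>
    if h : i < l.length then
      pvDedupLoop fuel (pvWhileRemove l.length l (l[i]'h)) (i + 1)
    else l

def is_three_liandui (cards : List Int) : Bool :=
  if cards.length < 9 then false
  else if cards.length % 3 ≠ 0 then false
  else if cards.any (fun card => cards.count card != 3) then false
  else
    -- new_cards = sorted copy of cards, then deduplicated in place
    let nc := pvDedupLoop (PySem.List.sorted cards (fun x => x) false).length
                (PySem.List.sorted cards (fun x => x) false) 0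
    -- new_cards[len(new_cards)-1]: index always in range (new_cards nonempty here)
    if PySem.List.pyGetD nc ((nc.length : Int) - 1) 0 > 15 then false
    else (PySem.List.pyRange 0 ((nc.length : Int) - 1) 1).all
           (fun idx => PySem.List.pyGetD nc idx 0 + 1 == PySem.List.pyGetD nc (idx + 1) 0)

-- ===== PORT B =====
def is_three_liandui_alt (cards : List Int) : Bool :=
  let n := cards.length
  if n < 9 || n % 3 != 0 then false
  else
    let counts : PySem.Dict Int Int :=
      cards.foldl (fun d c => d.insert c (d.getD c 0 + 1)) PySem.Dict.empty
    if counts.values.any (fun v => v != 3) then false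
    else
      let keys := PySem.List.sorted counts.keys (fun x => x) false
      -- keys[-1]: keys nonempty here (n ≥ 9)
      if PySem.List.pyGetD keys (-1) 0 > 15 then false
      else (keys.zip (keys.drop 1)).all (fun p => p.2 == p.1 + 1)  -- keys[1:] = drop 1

-- ===== PRECONDITION & SPEC =====
def Spec_is_three_liandui (cards : List Int) (out : Bool) : Prop := out = is_three_liandui_alt cards
instance (cards : List Int) (out : Bool) : Decidable (Spec_is_three_liandui cards out) := by unfold Spec_is_three_liandui; infer_instance

-- ===== CLAIM (what is proved, stated in full; the proofs are below) =====
def Claim_equal_is_three_liandui : Prop := ∀ (cards : List Int), Dom_is_three_liandui cards → Spec_is_three_liandui cards (is_three_liandui cards)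

-- ===== LEMMAS AND PROOFS =====

-- list.remove removes the first occurrence
lemma pv_remove_first (p t : List Int) (a : Int) (hp : a ∉ p) :
    PySem.List.remove? (p ++ a :: t) a = some (p ++ t) := by
  induction p with
  | nil => simp
  | cons x p ih =>
    have hx : x ≠ a := by intro h; exact hp (h ▸ List.mem_cons_self)
    have hp' : a ∉ p := fun h => hp (List.mem_cons_of_mem _ h)
    rw [List.cons_append, PySem.List.remove?_cons_of_ne _ hx, ih hp']
    rfl

-- the while loop strips a run of k+1 copies of a down to one copy
lemma pv_while_spec (k : Nat) : ∀ (p r : List Int) (a : Int) (fuel : Nat),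
    a ∉ p → a ∉ r → k ≤ fuel →
    pvWhileRemove fuel (p ++ List.replicate (k + 1) a ++ r) a = p ++ a :: r := by
  induction k with
  | zero =>
    intro p r a fuel hp hr _
    have hcnt : (p ++ List.replicate 1 a ++ r).count a = 1 := by
      simp [List.count_append, List.count_eq_zero.mpr hp, List.count_eq_zero.mpr hr]
    cases fuel with
    | zero => simp [pvWhileRemove]
    | succ f =>
      rw [pvWhileRemove, if_neg (fun hc => hc hcnt)]
      simp
  | succ k ih =>
    intro p r a fuel hp hr hfuel
    obtain ⟨f, rfl⟩ : ∃ f, fuel = f + 1 := ⟨fuel - 1, by omega⟩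
    have hcnt : (p ++ List.replicate (k + 2) a ++ r).count a = k + 2 := by
      simp [List.count_append, List.count_eq_zero.mpr hp, List.count_eq_zero.mpr hr]
    have hrm : PySem.List.remove? (p ++ List.replicate (k + 2) a ++ r) a
        = some (p ++ (List.replicate (k + 1) a ++ r)) := by
      rw [show p ++ List.replicate (k + 2) a ++ r
            = p ++ a :: (List.replicate (k + 1) a ++ r) by simp [List.replicate_succ]]
      exact pv_remove_first p _ a hp
    rw [pvWhileRemove, if_pos (by rw [hcnt]; omega), hrm]
    show pvWhileRemove f (p ++ (List.replicate (k + 1) a ++ r)) a = p ++ a :: r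
    rw [← List.append_assoc]
    exact ih p r a f hp hr (by omega)

-- a sorted list starts with a maximal run of its head
lemma pv_sorted_head_run (t : List Int) (a : Int) (h : (a :: t).Pairwise (· ≤ ·)) :
    ∃ (k : Nat) (r' : List Int), a :: t = List.replicate (k + 1) a ++ r' ∧
      (∀ x ∈ r', a < x) ∧ r'.Pairwise (· ≤ ·) := by
  induction t with
  | nil => exact ⟨0, [], by simp, by simp, by simp⟩
  | cons b t' ih =>
    have hab : a ≤ b := (List.pairwise_cons.mp h).1 b List.mem_cons_self
    have hat : ∀ x ∈ t', a ≤ x := fun x hx =>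
      (List.pairwise_cons.mp h).1 x (List.mem_cons_of_mem _ hx)
    have hbt : (b :: t').Pairwise (· ≤ ·) := (List.pairwise_cons.mp h).2
    by_cases hba : b = a
    · subst hba
      obtain ⟨k, r', heq, hlt, hpw⟩ := ih (List.pairwise_cons.mpr
        ⟨hat, (List.pairwise_cons.mp hbt).2⟩)
      exact ⟨k + 1, r', by rw [List.replicate_succ, List.cons_append, ← heq], hlt, hpw⟩
    · refine ⟨0, b :: t', by simp, ?_, hbt⟩
      intro x hx
      rcases List.mem_cons.mp hx with rfl | hx
      · exact lt_of_le_of_ne hab (fun h' => hba h'.symm)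
      · exact lt_of_lt_of_le (lt_of_le_of_ne hab (fun h' => hba h'.symm))
          ((List.pairwise_cons.mp hbt).1 x hx)

-- the dedup loop on p ++ r (r sorted, disjoint from p) appends the distinct values of r
lemma pv_dedup_spec (n : Nat) : ∀ (r p : List Int) (fuel : Nat),
    r.length ≤ n → r.Pairwise (· ≤ ·) → (∀ b ∈ p, b ∉ r) → r.length ≤ fuel →
    ∃ q, pvDedupLoop fuel (p ++ r) p.length = p ++ q ∧
      q.Pairwise (· < ·) ∧ (∀ x, x ∈ q ↔ x ∈ r) := by
  induction n with
  | zero =>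
    intro r p fuel hn _ _ _
    have hr : r = [] := List.length_eq_zero_iff.mp (by omega)
    subst hr
    refine ⟨[], ?_, by simp, by simp⟩
    cases fuel with
    | zero => simp [pvDedupLoop]
    | succ f => simp [pvDedupLoop]
  | succ m ih =>
    intro r p fuel hn hsort hdisj hfuel
    cases r with
    | nil =>
      refine ⟨[], ?_, by simp, by simp⟩
      cases fuel with
      | zero => simp [pvDedupLoop]
      | succ f => simp [pvDedupLoop]
    | cons a t =>
      obtain ⟨k, r', heq, hlt, hpw⟩ := pv_sorted_head_run t a hsort
      have hlaux : t.length + 1 = k + 1 + r'.length := by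
        have := congrArg List.length heq
        simpa using this
      have hn' : t.length + 1 ≤ m + 1 := by simpa using hn
      obtain ⟨f, rfl⟩ : ∃ f, fuel = f + 1 := ⟨fuel - 1, by
        have : t.length + 1 ≤ fuel := by simpa using hfuel
        omega⟩
      have hf' : t.length + 1 ≤ f + 1 := by simpa using hfuel
      have hlen : p.length < (p ++ a :: t).length := by simp
      have hget : (p ++ a :: t)[p.length]'hlen = a := by
        rw [List.getElem_append_right (le_refl p.length)]
        simp
      have hanp : a ∉ p := fun hap => hdisj a hap List.mem_cons_self
      have hanr' : a ∉ r' := fun hx => lt_irrefl a (hlt a hx)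
      have hr'sub : ∀ x ∈ r', x ∈ a :: t := by
        intro x hx; rw [heq]; exact List.mem_append_right _ hx
      have hwhile : pvWhileRemove (p ++ a :: t).length (p ++ a :: t) a = p ++ a :: r' := by
        have hlenfuel : k ≤ (p ++ a :: t).length := by
          simp only [List.length_append, List.length_cons]
          omega
        calc pvWhileRemove (p ++ a :: t).length (p ++ a :: t) a
            = pvWhileRemove (p ++ a :: t).length (p ++ List.replicate (k + 1) a ++ r') a := by
              rw [show p ++ List.replicate (k + 1) a ++ r'
                    = p ++ (List.replicate (k + 1) a ++ r') by simp, ← heq]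
          _ = p ++ a :: r' := pv_while_spec k p r' a _ hanp hanr' hlenfuel
      rw [pvDedupLoop]
      simp only [hlen, dif_pos, hget, hwhile]
      rw [show p ++ a :: r' = (p ++ [a]) ++ r' by simp,
          show p.length + 1 = (p ++ [a]).length by simp]
      obtain ⟨q', hq', hqpw, hqmem⟩ := ih r' (p ++ [a]) f (by omega)
        hpw
        (by
          intro b hb hbr'
          rcases List.mem_append.mp hb with hb | hb
          · exact hdisj b hb (hr'sub b hbr')
          · simp only [List.mem_singleton] at hb
            subst hb
            exact hanr' hbr')
        (by omega)
      refine ⟨a :: q', by rw [hq']; simp, ?_, ?_⟩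
      · exact List.pairwise_cons.mpr ⟨fun x hx => hlt x ((hqmem x).mp hx), hqpw⟩
      · intro x
        rw [List.mem_cons, hqmem x, heq]
        simp [List.mem_replicate]

-- A's sort-then-dedup equals B's sorted distinct keys
lemma pv_lists_eq (cards : List Int) :
    pvDedupLoop (PySem.List.sorted cards (fun x => x) false).length
        (PySem.List.sorted cards (fun x => x) false) 0
      = PySem.List.sorted (PySem.Set.ofList cards) (fun x => x) false := by
  set s := PySem.List.sorted cards (fun x => x) false with hs
  have hsort : s.Pairwise (· ≤ ·) := by
    have := PySem.List.sorted_pairwise (κ := Int) cards (fun x => x)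
    simpa [hs] using this
  obtain ⟨q, hq, hqpw, hqmem⟩ :=
    pv_dedup_spec s.length s [] s.length (le_refl _) hsort (by simp) (le_refl _)
  simp only [List.nil_append, List.length_nil] at hq
  rw [hq]
  have hperm : q.Perm (PySem.Set.ofList cards) := by
    refine (List.perm_ext_iff_of_nodup (hqpw.imp (fun h => ne_of_lt h))
      (PySem.Set.nodup_ofList cards)).mpr ?_
    intro x
    rw [hqmem x, PySem.Set.mem_ofList]
    rw [hs, PySem.List.mem_sorted]
  exact (PySem.List.sorted_eq_of_perm_of_pairwise_lt (PySem.Set.ofList cards) q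
    (fun x => x) hperm hqpw).symm

-- A's per-card count check equals B's check on the counter's values
lemma pv_guard_eq (cards : List Int) :
    (PySem.Dict.counter cards).values.any (fun v => v != 3)
      = cards.any (fun card => cards.count card != 3) := by
  rw [Bool.eq_iff_iff]
  simp only [List.any_eq_true, PySem.Dict.values, PySem.Dict.items_counter, List.map_map,
    List.mem_map, Function.comp, PySem.Set.mem_ofList, bne_iff_ne, ne_eq]
  constructor
  · rintro ⟨v, ⟨c, hc, rfl⟩, hne⟩
    refine ⟨c, hc, ?_⟩
    intro h
    apply hne
    simp [h]
  · rintro ⟨c, hc, hne⟩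
    refine ⟨(cards.count c : Int), ⟨c, hc, rfl⟩, ?_⟩
    intro h
    apply hne
    omega

-- the two spellings of the last element agree on nonempty lists
lemma pv_last_eq (u : List Int) (hu : u ≠ []) :
    PySem.List.pyGetD u ((u.length : Int) - 1) 0 = PySem.List.pyGetD u (-1) 0 := by
  have hlen : 0 < u.length := List.length_pos_iff.mpr hu
  rw [PySem.List.pyGetD_neg_one u 0 hu,
      PySem.List.pyGetD_eq_getElem u 0 (by omega) (by omega),
      List.getLast_eq_getElem]
  congr 1
  omega

-- index-range consecutive check equals the zip-with-successor check
lemma pv_consec_eq (u : List Int) :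
    (PySem.List.pyRange 0 ((u.length : Int) - 1) 1).all
        (fun idx => PySem.List.pyGetD u idx 0 + 1 == PySem.List.pyGetD u (idx + 1) 0)
      = (u.zip (u.drop 1)).all (fun p => p.2 == p.1 + 1) := by
  rw [Bool.eq_iff_iff]
  simp only [List.all_eq_true, PySem.List.mem_pyRange_one, beq_iff_eq]
  constructor
  · intro h p hp
    obtain ⟨i, hi, hpi⟩ := List.getElem_of_mem hp
    have hilen : i < u.length - 1 := by
      simpa [List.length_zip] using hi
    have h1 : i < u.length := by omega
    have h2 : i + 1 < u.length := by omega
    have hpeq : p = (u[i]'h1, u[i + 1]'h2) := by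
      rw [← hpi, List.getElem_zip]
      congr 1
      rw [List.getElem_drop]
      congr 1
      omega
    subst hpeq
    have hc := h (i : Int) (by constructor <;> omega)
    rw [PySem.List.pyGetD_eq_getElem u 0 (by omega) (by omega),
        PySem.List.pyGetD_eq_getElem u 0 (by omega) (by omega)] at hc
    simp only [Int.toNat_natCast,
      show ((i : Int) + 1).toNat = i + 1 by omega] at hc
    omega
  · intro h idx hidx
    have h0 : (0 : Int) ≤ idx := hidx.1
    have hlt : idx < (u.length : Int) - 1 := hidx.2
    have h1 : idx.toNat < u.length := by omega
    have h2 : idx.toNat + 1 < u.length := by omega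
    rw [PySem.List.pyGetD_eq_getElem u 0 (by omega) (by omega),
        PySem.List.pyGetD_eq_getElem u 0 (by omega) (by omega)]
    simp only [show (idx + 1).toNat = idx.toNat + 1 by omega]
    have hmem : (u[idx.toNat]'h1, u[idx.toNat + 1]'h2) ∈ u.zip (u.drop 1) := by
      refine List.mem_iff_getElem.mpr ⟨idx.toNat, by simp [List.length_zip]; omega, ?_⟩
      rw [List.getElem_zip]
      congr 1
      rw [List.getElem_drop]
      congr 1
      omega
    have hz := h _ hmem
    omega

-- the two ports agree on every input
lemma pv_main (cards : List Int) : is_three_liandui cards = is_three_liandui_alt cards := by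
  by_cases h9 : cards.length < 9
  · simp [is_three_liandui, is_three_liandui_alt, h9]
  by_cases h3 : cards.length % 3 = 0
  case neg => simp [is_three_liandui, is_three_liandui_alt, h9, h3]
  have hin : List.foldl (fun d c => d.insert c (d.getD c 0 + 1)) PySem.Dict.empty cards
      = PySem.Dict.counter cards :=
    PySem.Dict.foldl_insert_getD_add_one_eq_counter cards
  have hkeys : (PySem.Dict.counter cards).keys = PySem.Set.ofList cards :=
    PySem.Dict.keys_counter cards
  have hune : PySem.List.sorted (PySem.Set.ofList cards) (fun x => x) false ≠ [] := by
    intro hnil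
    have hcards : PySem.Set.ofList cards = [] :=
      (PySem.List.sorted_eq_nil_iff _ _ _).mp hnil
    cases cards with
    | nil => simp at h9
    | cons c cs =>
      have hm : c ∈ PySem.Set.ofList (c :: cs) :=
        (PySem.Set.mem_ofList _ _).mpr List.mem_cons_self
      rw [hcards] at hm
      simp at hm
  have hlast := pv_last_eq _ hune
  have hcons := pv_consec_eq (PySem.List.sorted (PySem.Set.ofList cards) (fun x => x) false)
  simp only [is_three_liandui, is_three_liandui_alt, h9, h3, hin, pv_guard_eq, hkeys,
    pv_lists_eq, hlast, hcons, if_false, decide_false, Bool.false_or, ne_eq,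
    not_true_eq_false, bne_self_eq_false, Bool.false_eq_true]

-- ===== VERDICT (by name: the statement is the Claim_ definition above) =====
theorem is_three_liandui_spec : Claim_equal_is_three_liandui := by
  intro cards _
  unfold Spec_is_three_liandui
  exact pv_main cards
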